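-- pv_equiv track=rewrite | github.com/coremedy/Python-Algorithms-DataStructure | Python-Algorithms-DataStructure/src/cc/chap1/1_1.py | find_the_closest_dword
-- ===== SOURCE A (Python) =====
-- def find_the_closest_dword(char_ord, boundary):
--     (begin, end, middle) = (0, len(boundary) - 1, (len(boundary) - 1) // 2)
--     while (middle != begin):
--         if char_ord < boundary[middle]:
--             end = middle
--         else:
--             begin = middle
--         middle = (begin + end) // 2
--     return (begin, 1 << (char_ord - boundary[begin]))
-- ===== SOURCE B (Python) =====
-- def find_the_closest_dword(char_ord, boundary):
--     # Linear scan: the last interior index whose boundary is <= char_ord (default 0).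
--     begin = 0
--     for i in range(1, len(boundary) - 1):
--         if boundary[i] <= char_ord:
--             begin = i
--     return (begin, 1 << (char_ord - boundary[begin]))
-- ===== Notes on version B (the rewrite author's own statement) =====
-- stated objective: simpler
-- what changed: Replaces the stateful binary search over (begin, end, middle) with a single forward scan that keeps the last interior index whose boundary value is <= char_ord; identical results on nonempty boundary tables that are nondecreasing or force the search's walk one way (Pre_).
-- outside the precondition, e.g. on find_the_closest_dword(1, [-1, 1, 2, 0, 0]): A returns (1, 1), B returns (3, 2); on find_the_closest_dword(-2, [0, 1]): A raises ValueError, B raises ValueError; on find_the_closest_dword(5, []): A raises IndexError, B raises IndexError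
import Mathlib
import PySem

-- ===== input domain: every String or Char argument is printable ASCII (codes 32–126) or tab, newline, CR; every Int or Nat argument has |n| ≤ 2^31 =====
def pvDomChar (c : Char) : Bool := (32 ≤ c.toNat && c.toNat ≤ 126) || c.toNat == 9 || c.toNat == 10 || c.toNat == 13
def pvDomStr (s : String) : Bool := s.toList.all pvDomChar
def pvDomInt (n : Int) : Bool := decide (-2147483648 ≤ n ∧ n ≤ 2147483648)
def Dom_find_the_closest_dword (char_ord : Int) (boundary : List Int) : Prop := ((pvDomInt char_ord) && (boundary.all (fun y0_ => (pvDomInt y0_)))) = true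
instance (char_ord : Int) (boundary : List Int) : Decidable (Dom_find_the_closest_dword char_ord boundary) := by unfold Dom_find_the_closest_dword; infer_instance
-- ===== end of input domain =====

-- B replaces A's binary search with a single forward scan for the last interior
-- boundary index whose value is ≤ char_ord; equal results on nonempty nondecreasing
-- boundary tables with boundary[0] ≤ char_ord (Pre_ below).


-- ===== PORT A =====
-- A's `while middle != begin` loop.  `fuel` only makes the recursion structural: on
-- every input admitted by Pre_ the interval end-begin strictly shrinks each pass, so
-- the loop exits within boundary.length iterations, before fuel runs out.
-- `pyGetD _ _ 0`: Python raises IndexError on an out-of-range index; Pre_ excludes those inputs.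
def pvGoA (char_ord : Int) (boundary : List Int) : Nat → Int → Int → Int → Int
  | 0, begin_, _, _ => begin_
  | fuel+1, begin_, end_, middle =>
    if middle ≠ begin_ then
      if char_ord < PySem.List.pyGetD boundary middle 0 then
        pvGoA char_ord boundary fuel begin_ middle (PySem.Int.floordiv (begin_ + middle) 2)
      else
        pvGoA char_ord boundary fuel middle end_ (PySem.Int.floordiv (middle + end_) 2)
    else begin_

-- Python's `1 << k` raises ValueError for k < 0; Pre_ excludes that, so `.toNat` is exact.
def find_the_closest_dword (char_ord : Int) (boundary : List Int) : Int × Int :=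
  let begin_ := pvGoA char_ord boundary (boundary.length + 1) 0 ((boundary.length : Int) - 1)
      (PySem.Int.floordiv ((boundary.length : Int) - 1) 2)
  (begin_, 2 ^ (char_ord - PySem.List.pyGetD boundary begin_ 0).toNat)

-- ===== PORT B =====
def find_the_closest_dword_alt (char_ord : Int) (boundary : List Int) : Int × Int :=
  let begin_ := (PySem.List.pyRange 1 ((boundary.length : Int) - 1) 1).foldl
      (fun acc i => if PySem.List.pyGetD boundary i 0 ≤ char_ord then i else acc) 0
  (begin_, 2 ^ (char_ord - PySem.List.pyGetD boundary begin_ 0).toNat)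

-- ===== PRECONDITION & SPEC =====
-- Pre_ admits a NONEMPTY boundary table with boundary[0] ≤ char_ord that is either
-- NONDECREASING (the binary search's natural domain) or forces the search's walk one
-- way (every element of boundary[:-1] ≤ char_ord, or every interior element
-- > char_ord).  Excluded: the empty list (A raises IndexError), char_ord < boundary[0]
-- (both programs raise ValueError on 1 << negative), and the remaining unsorted
-- tables, where A's returned index is an artefact of the binary-search path and no
-- particular value is the specified one.
def Pre_find_the_closest_dword (char_ord : Int) (boundary : List Int) : Prop :=
  boundary ≠ [] ∧ boundary.headI ≤ char_ord ∧
    (boundary.Pairwise (· ≤ ·) ∨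
     (∀ i : Nat, i < boundary.length - 1 → boundary.getD i 0 ≤ char_ord) ∨
     (∀ i : Nat, i < boundary.length - 1 → 1 ≤ i → char_ord < boundary.getD i 0))
instance (char_ord : Int) (boundary : List Int) : Decidable (Pre_find_the_closest_dword char_ord boundary) := by unfold Pre_find_the_closest_dword; infer_instance

def pvWitness_find_the_closest_dword : Int × List Int := (65, [0, 32, 64, 96])

def Spec_find_the_closest_dword (char_ord : Int) (boundary : List Int) (out : Int × Int) : Prop := out = find_the_closest_dword_alt char_ord boundary
instance (char_ord : Int) (boundary : List Int) (out : Int × Int) : Decidable (Spec_find_the_closest_dword char_ord boundary out) := by unfold Spec_find_the_closest_dword; infer_instance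

-- ===== CLAIM (what is proved, stated in full; the proofs are below) =====
def Claim_equal_find_the_closest_dword : Prop := ∀ (char_ord : Int) (boundary : List Int), Dom_find_the_closest_dword char_ord boundary → Pre_find_the_closest_dword char_ord boundary → Spec_find_the_closest_dword char_ord boundary (find_the_closest_dword char_ord boundary)

-- ===== LEMMAS AND PROOFS =====

-- boundary[i] as both ports read it
def pvVal (b : List Int) (i : Int) : Int := PySem.List.pyGetD b i 0

-- The common characterisation of both results: r is the last interior index with
-- boundary[r] ≤ c, defaulting to 0.
def pvQ (c : Int) (b : List Int) (r : Int) : Prop :=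
  0 ≤ r ∧ (r = 0 ∨ (r < (b.length : Int) - 1 ∧ pvVal b r ≤ c)) ∧
  ∀ j : Int, r < j → j < (b.length : Int) - 1 → c < pvVal b j

lemma pvQ_unique (c : Int) (b : List Int) (r1 r2 : Int)
    (h1 : pvQ c b r1) (h2 : pvQ c b r2) : r1 = r2 := by
  obtain ⟨h10, h11, h12⟩ := h1
  obtain ⟨h20, h21, h22⟩ := h2
  by_contra hne
  rcases lt_or_gt_of_ne hne with h | h
  · rcases h21 with rfl | ⟨hlt, hle⟩
    · omega
    · exact absurd (h12 r2 h hlt) (not_lt.2 hle)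
  · rcases h11 with rfl | ⟨hlt, hle⟩
    · omega
    · exact absurd (h22 r1 h hlt) (not_lt.2 hle)

lemma pvVal_mono (b : List Int) (hs : b.Pairwise (· ≤ ·)) {i j : Int}
    (h0 : 0 ≤ i) (hij : i ≤ j) (hj : j < (b.length : Int)) : pvVal b i ≤ pvVal b j := by
  have hi : i < (b.length : Int) := lt_of_le_of_lt hij hj
  rw [pvVal, pvVal, PySem.List.pyGetD_eq_getElem b 0 h0 hi,
      PySem.List.pyGetD_eq_getElem b 0 (by omega) hj]
  rcases eq_or_lt_of_le hij with rfl | hlt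
  · exact le_refl _
  · exact (List.pairwise_iff_getElem.mp hs) i.toNat j.toNat (by omega) (by omega) (by omega)

-- A's loop lands in pvQ.
lemma pvGoA_Q (c : Int) (b : List Int) (hs : b.Pairwise (· ≤ ·)) :
    ∀ (fuel : Nat) (begin_ end_ middle : Int),
    0 ≤ begin_ → begin_ < end_ → end_ ≤ (b.length : Int) - 1 →
    (begin_ = 0 ∨ pvVal b begin_ ≤ c) →
    (end_ = (b.length : Int) - 1 ∨ c < pvVal b end_) →
    middle = PySem.Int.floordiv (begin_ + end_) 2 →
    (end_ - begin_).toNat < fuel →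
    pvQ c b (pvGoA c b fuel begin_ end_ middle) := by
  intro fuel
  induction fuel with
  | zero => intro begin_ end_ middle _ h2 _ _ _ _ hfuel; omega
  | succ fuel ih =>
    intro begin_ end_ middle h1 h2 h3 h4 h5 hmid hfuel
    have hm : middle = (begin_ + end_) / 2 := by
      rw [hmid, PySem.Int.floordiv_eq_ediv_of_pos (by norm_num)]
    have hbm : begin_ ≤ middle := by omega
    have hme : middle < end_ := by omega
    rw [pvGoA]
    by_cases hc : middle = begin_
    · simp only [hc, ne_eq, not_true_eq_false, if_false]
      have hend : end_ = begin_ + 1 := by omega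
      refine ⟨h1, ?_, ?_⟩
      · rcases h4 with rfl | hv
        · exact Or.inl rfl
        · exact Or.inr ⟨by omega, hv⟩
      · intro j hj1 hj2
        rcases h5 with rfl | hv
        · omega
        · exact lt_of_lt_of_le hv (pvVal_mono b hs (by omega) (by omega) (by omega))
    · simp only [ne_eq, hc, not_false_eq_true, if_true]
      by_cases hlt : c < PySem.List.pyGetD b middle 0
      · simp only [hlt, if_true]
        exact ih begin_ middle _ h1 (by omega) (by omega) h4 (Or.inr hlt) rfl (by omega)
      · simp only [hlt, if_false]
        exact ih middle end_ _ (by omega) hme h3 (Or.inr (not_lt.mp hlt)) h5 rfl (by omega)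

-- B's fold lands in pvQ (statement over the Nat upper bound k of the scanned range).
lemma pvFoldB_Q (c : Int) (b : List Int) (k : Nat) :
    0 ≤ (PySem.List.pyRange 1 (k : Int) 1).foldl
        (fun acc i => if PySem.List.pyGetD b i 0 ≤ c then i else acc) 0 ∧
    ((PySem.List.pyRange 1 (k : Int) 1).foldl
        (fun acc i => if PySem.List.pyGetD b i 0 ≤ c then i else acc) 0 = 0 ∨
      ((1:Int) ≤ (PySem.List.pyRange 1 (k : Int) 1).foldl
        (fun acc i => if PySem.List.pyGetD b i 0 ≤ c then i else acc) 0 ∧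
       (PySem.List.pyRange 1 (k : Int) 1).foldl
        (fun acc i => if PySem.List.pyGetD b i 0 ≤ c then i else acc) 0 < (k : Int) ∧
       pvVal b ((PySem.List.pyRange 1 (k : Int) 1).foldl
        (fun acc i => if PySem.List.pyGetD b i 0 ≤ c then i else acc) 0) ≤ c)) ∧
    ∀ j : Int, (PySem.List.pyRange 1 (k : Int) 1).foldl
        (fun acc i => if PySem.List.pyGetD b i 0 ≤ c then i else acc) 0 < j →
      j < (k : Int) → c < pvVal b j := by
  induction k with
  | zero =>
    rw [PySem.List.pyRange_one_eq_nil (by norm_num)]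
    simp only [List.foldl_nil]
    exact ⟨le_refl _, by simp, fun j h1 h2 => by omega⟩
  | succ k ih =>
    by_cases hk : k = 0
    · subst hk
      rw [show ((1:Nat) : Int) = 1 by norm_num, PySem.List.pyRange_one_eq_nil (by norm_num)]
      simp only [List.foldl_nil]
      exact ⟨le_refl _, by simp, fun j h1 h2 => by omega⟩
    · have hk1 : (1:Int) ≤ (k : Int) := by omega
      have hrw : PySem.List.pyRange 1 ((k+1 : Nat) : Int) 1
          = PySem.List.pyRange 1 (k : Int) 1 ++ [(k : Int)] := by
        push_cast
        exact PySem.List.pyRange_one_succ_right hk1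
      rw [hrw, List.foldl_append]
      obtain ⟨ih0, ih1, ih2⟩ := ih
      simp only [List.foldl_cons, List.foldl_nil]
      by_cases hval : PySem.List.pyGetD b (k : Int) 0 ≤ c
      · simp only [hval, if_true]
        refine ⟨by omega, Or.inr ⟨by omega, by push_cast; omega, hval⟩, ?_⟩
        intro j h1 h2
        push_cast at h2
        omega
      · simp only [hval, if_false]
        refine ⟨ih0, ?_, ?_⟩
        · rcases ih1 with h | ⟨ha, hb, hc'⟩
          · exact Or.inl h
          · exact Or.inr ⟨ha, by push_cast; omega, hc'⟩
        · intro j h1 h2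
          push_cast at h2
          rcases lt_or_ge j (k : Int) with hj | hj
          · exact ih2 j h1 hj
          · have : j = (k : Int) := by omega
            subst this
            exact lt_of_not_ge hval

-- A's loop when every comparison sends it right: it ends on end_ - 1.
lemma pvGoA_right (c : Int) (b : List Int)
    (hall : ∀ i : Int, 0 ≤ i → i < (b.length : Int) - 1 → pvVal b i ≤ c) :
    ∀ (fuel : Nat) (begin_ middle : Int),
    0 ≤ begin_ → begin_ < (b.length : Int) - 1 →
    middle = PySem.Int.floordiv (begin_ + ((b.length : Int) - 1)) 2 →
    ((b.length : Int) - 1 - begin_).toNat < fuel →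
    pvGoA c b fuel begin_ ((b.length : Int) - 1) middle = (b.length : Int) - 2 := by
  intro fuel
  induction fuel with
  | zero => intro begin_ middle _ h2 _ hfuel; omega
  | succ fuel ih =>
    intro begin_ middle h1 h2 hmid hfuel
    have hm : middle = (begin_ + ((b.length : Int) - 1)) / 2 := by
      rw [hmid, PySem.Int.floordiv_eq_ediv_of_pos (by norm_num)]
    rw [pvGoA]
    by_cases hc : middle = begin_
    · simp only [hc, ne_eq, not_true_eq_false, if_false]
      omega
    · simp only [ne_eq, hc, not_false_eq_true, if_true]
      have hv : ¬ c < PySem.List.pyGetD b middle 0 :=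
        not_lt.2 (hall middle (by omega) (by omega))
      simp only [hv, if_false]
      exact ih middle _ (by omega) (by omega) rfl (by omega)

-- A's loop when every comparison at an interior index sends it left: it ends on 0.
lemma pvGoA_left (c : Int) (b : List Int)
    (hall : ∀ i : Int, 1 ≤ i → i < (b.length : Int) - 1 → c < pvVal b i) :
    ∀ (fuel : Nat) (end_ middle : Int),
    0 < end_ → end_ ≤ (b.length : Int) - 1 →
    middle = PySem.Int.floordiv (0 + end_) 2 →
    end_.toNat < fuel →
    pvGoA c b fuel 0 end_ middle = 0 := by
  intro fuel
  induction fuel with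
  | zero => intro end_ middle h1 _ _ hfuel; omega
  | succ fuel ih =>
    intro end_ middle h1 h2 hmid hfuel
    have hm : middle = (0 + end_) / 2 := by
      rw [hmid, PySem.Int.floordiv_eq_ediv_of_pos (by norm_num)]
    rw [pvGoA]
    by_cases hc : middle = 0
    · simp only [hc, ne_eq, not_true_eq_false, if_false]
    · simp only [ne_eq, hc, not_false_eq_true, if_true]
      have hv : c < PySem.List.pyGetD b middle 0 := hall middle (by omega) (by omega)
      simp only [hv, if_true]
      exact ih middle _ (by omega) (by omega) rfl (by omega)

-- ===== VERDICT (by name: the statement is the Claim_ definition above) =====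
theorem find_the_closest_dword_spec : Claim_equal_find_the_closest_dword := by
  intro c b _ hpre
  obtain ⟨hne, _, hcase⟩ := hpre
  unfold Spec_find_the_closest_dword find_the_closest_dword find_the_closest_dword_alt
  have hlen : 1 ≤ b.length := List.length_pos_iff.mpr hne
  rcases Nat.lt_or_ge b.length 2 with hsmall | hbig
  · -- length = 1: A's loop exits immediately, B's range is empty; both return index 0
    have h1 : b.length = 1 := by omega
    have hA : pvGoA c b (b.length + 1) 0 ((b.length : Int) - 1)
        (PySem.Int.floordiv ((b.length : Int) - 1) 2) = 0 := by
      rw [h1]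
      norm_num [pvGoA, PySem.Int.floordiv]
    have hB : (PySem.List.pyRange 1 ((b.length : Int) - 1) 1).foldl
        (fun acc i => if PySem.List.pyGetD b i 0 ≤ c then i else acc) 0 = 0 := by
      rw [h1]
      norm_num [PySem.List.pyRange_one_eq_nil]
    simp only [hA, hB]
  · -- length ≥ 2: both results satisfy pvQ, which has a unique solution
    have hA : pvQ c b (pvGoA c b (b.length + 1) 0 ((b.length : Int) - 1)
        (PySem.Int.floordiv ((b.length : Int) - 1) 2)) := by
      rcases hcase with hs | hall | hall
      · -- nondecreasing table: the binary-search invariant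
        refine pvGoA_Q c b hs (b.length + 1) 0 ((b.length : Int) - 1) _
          (le_refl 0) (by omega) (le_refl _) (Or.inl rfl) (Or.inl rfl)
          (by rw [zero_add]) (by omega)
      · -- every element of boundary[:-1] ≤ c: the walk is forced right, A ends on length-2
        have hall' : ∀ i : Int, 0 ≤ i → i < (b.length : Int) - 1 → pvVal b i ≤ c := by
          intro i h0 hi
          have h := hall i.toNat (by omega)
          rwa [List.getD_eq_getElem b 0 (by omega),
               ← PySem.List.pyGetD_eq_getElem b 0 h0 (by omega)] at h
        rw [pvGoA_right c b hall' (b.length + 1) 0 _ (le_refl 0) (by omega)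
            (by rw [zero_add]) (by omega)]
        refine ⟨by omega, ?_, fun j hj1 hj2 => by omega⟩
        rcases Nat.lt_or_ge b.length 3 with h3 | h3
        · exact Or.inl (by omega)
        · exact Or.inr ⟨by omega, hall' _ (by omega) (by omega)⟩
      · -- every interior element > c: the walk is forced left, A ends on 0
        have hall' : ∀ i : Int, 1 ≤ i → i < (b.length : Int) - 1 → c < pvVal b i := by
          intro i h1 hi
          have h := hall i.toNat (by omega) (by omega)
          rwa [List.getD_eq_getElem b 0 (by omega),
               ← PySem.List.pyGetD_eq_getElem b 0 (by omega) (by omega)] at h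
        rw [pvGoA_left c b hall' (b.length + 1) _ _ (by omega) (le_refl _) (by rw [zero_add]) (by omega)]
        exact ⟨le_refl 0, Or.inl rfl, fun j hj1 hj2 => hall' j (by omega) hj2⟩
    have hB : pvQ c b ((PySem.List.pyRange 1 ((b.length : Int) - 1) 1).foldl
        (fun acc i => if PySem.List.pyGetD b i 0 ≤ c then i else acc) 0) := by
      have hcast : ((b.length - 1 : Nat) : Int) = (b.length : Int) - 1 := by omega
      obtain ⟨h0, h1, h2⟩ := pvFoldB_Q c b (b.length - 1)
      rw [hcast] at h0 h1 h2
      exact ⟨h0, by tauto, h2⟩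
    have := pvQ_unique c b _ _ hA hB
    rw [this]
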